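-- pv_equiv track=rewrite | github.com/agoessling/stuff_sack | src/stuff_sack.py | _bytes_for_bits
-- ===== SOURCE A (Python) =====
-- def _bytes_for_bits(bits):
--   if bits < 0:
--     raise ValueError('Negative bits not allowed.')
--
--   raw_bytes = (bits - 1) // 8 + 1
--
--   for x in [1, 2, 4, 8]:
--     if x >= raw_bytes:
--       return x
--
--   raise ValueError('Value greater than 8 bytes.')
-- ===== SOURCE B (Python) =====
-- def _bytes_for_bits(bits):
--   if bits < 0:
--     raise ValueError('Negative bits not allowed.')
--
--   raw_bytes = (bits - 1) // 8 + 1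
--
--   if raw_bytes <= 0:
--     return 1
--   p = 1 << (int(raw_bytes) - 1).bit_length()
--   if p > 8:
--     raise ValueError('Value greater than 8 bytes.')
--   return p
-- ===== Notes on version B (the rewrite author's own statement) =====
-- stated objective: simpler
-- what changed: Replaces the linear scan over [1,2,4,8] with a closed-form round-up to the next power of two via bit_length.
import Mathlib
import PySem

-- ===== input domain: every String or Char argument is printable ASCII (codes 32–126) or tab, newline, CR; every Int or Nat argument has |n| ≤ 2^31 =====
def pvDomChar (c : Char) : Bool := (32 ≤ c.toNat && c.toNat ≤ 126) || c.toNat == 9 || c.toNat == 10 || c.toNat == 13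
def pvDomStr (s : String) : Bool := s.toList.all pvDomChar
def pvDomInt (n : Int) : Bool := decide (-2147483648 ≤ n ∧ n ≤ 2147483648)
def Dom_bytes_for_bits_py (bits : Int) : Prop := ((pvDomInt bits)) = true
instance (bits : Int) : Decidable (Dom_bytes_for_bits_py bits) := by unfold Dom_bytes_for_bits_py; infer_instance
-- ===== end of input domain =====

-- B computes the power-of-two byte size in closed form via bit_length instead of scanning [1,2,4,8] (objective: simpler).


-- ===== PORT A =====
-- the for-loop over [1, 2, 4, 8]; [] = the fall-through 'raise ValueError' (unreachable inside Pre_), 0 is a junk value there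
def bytesLoopA (raw : Int) : List Int → Int
  | [] => 0
  | x :: rest => if x ≥ raw then x else bytesLoopA raw rest

def bytes_for_bits_py (bits : Int) : Int :=
  -- 'if bits < 0: raise' is excluded by Pre_
  let raw_bytes := PySem.Int.floordiv (bits - 1) 8 + 1
  bytesLoopA raw_bytes [1, 2, 4, 8]

-- ===== PORT B =====
def bytes_for_bits_py_alt (bits : Int) : Int :=
  -- 'if bits < 0: raise' is excluded by Pre_
  let raw_bytes := PySem.Int.floordiv (bits - 1) 8 + 1
  if raw_bytes ≤ 0 then 1
  else
    -- 'if p > 8: raise' is excluded by Pre_; the port returns p there (outside the claim)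
    (2 : Int) ^ Nat.size (raw_bytes - 1).toNat  -- Nat.size = Python's builtin int.bit_length on nonnegative ints (exact here since raw_bytes > 0)

-- ===== PRECONDITION & SPEC =====
-- Pre_ excludes exactly the inputs where A raises ValueError: bits < 0, and bits > 64 (more than 8 bytes)
def Pre_bytes_for_bits_py (bits : Int) : Prop := 0 ≤ bits ∧ bits ≤ 64
instance (bits : Int) : Decidable (Pre_bytes_for_bits_py bits) := by unfold Pre_bytes_for_bits_py; infer_instance
def pvWitness_bytes_for_bits_py : Int := 17

def Spec_bytes_for_bits_py (bits : Int) (out : Int) : Prop := out = bytes_for_bits_py_alt bits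
instance (bits : Int) (out : Int) : Decidable (Spec_bytes_for_bits_py bits out) := by unfold Spec_bytes_for_bits_py; infer_instance

-- ===== CLAIM (what is proved, stated in full; the proofs are below) =====
def Claim_equal_bytes_for_bits_py : Prop := ∀ (bits : Int), Dom_bytes_for_bits_py bits → Pre_bytes_for_bits_py bits → Spec_bytes_for_bits_py bits (bytes_for_bits_py bits)

-- ===== LEMMAS AND PROOFS =====

-- ===== VERDICT (by name: the statement is the Claim_ definition above) =====
theorem bytes_for_bits_py_spec : Claim_equal_bytes_for_bits_py := by
  intro bits _ hpre
  unfold Spec_bytes_for_bits_py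
  obtain ⟨h0, h64⟩ := hpre
  interval_cases bits <;> decide
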